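-- pv_equiv track=rewrite | github.com/jnerytech/ets2-light-sync | app/map_widget.py | _extract_sunrise_sunset
-- ===== SOURCE A (Python) =====
-- from typing import Optional
--
-- def _extract_sunrise_sunset(
--     curve: list,
-- ) -> tuple[Optional[int], Optional[int]]:
--     """Find approximate sunrise and sunset times from a curve.
--
--     Sunrise = first transition to brightness >= 200.
--     Sunset  = last time brightness >= 200 before going dark.
--     """
--     sunrise_min: Optional[int] = None
--     sunset_min:  Optional[int] = None
--     for i in range(len(curve) - 1):
--         t0, b0, _ = curve[i]
--         t1, b1, _ = curve[i + 1]
--         if b0 < 200 <= b1 and sunrise_min is None: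
--             sunrise_min = t0
--         if b0 >= 200 > b1:
--             sunset_min = t0
--     return sunrise_min, sunset_min
-- ===== SOURCE B (Python) =====
-- from typing import Optional
--
-- def _extract_sunrise_sunset(
--     curve: list,
-- ) -> tuple[Optional[int], Optional[int]]:
--     """Two separate early-exit scans: forward for sunrise, backward for sunset."""
--     n = len(curve)
--     sunrise = None
--     for i in range(n - 1):
--         t0, b0, _ = curve[i]
--         _, b1, _ = curve[i + 1]
--         if b0 < 200 <= b1:
--             sunrise = t0
--             break
--     sunset = None
--     for i in range(n - 2, -1, -1):
--         t0, b0, _ = curve[i]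
--         _, b1, _ = curve[i + 1]
--         if b0 >= 200 > b1:
--             sunset = t0
--             break
--     return sunrise, sunset
-- ===== Notes on version B (the rewrite author's own statement) =====
-- stated objective: alternative
-- what changed: One combined full-length loop maintaining both results is replaced by two independent early-exit scans: a forward scan that stops at the first sunrise transition and a backward scan that stops at the last sunset transition.
import Mathlib
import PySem

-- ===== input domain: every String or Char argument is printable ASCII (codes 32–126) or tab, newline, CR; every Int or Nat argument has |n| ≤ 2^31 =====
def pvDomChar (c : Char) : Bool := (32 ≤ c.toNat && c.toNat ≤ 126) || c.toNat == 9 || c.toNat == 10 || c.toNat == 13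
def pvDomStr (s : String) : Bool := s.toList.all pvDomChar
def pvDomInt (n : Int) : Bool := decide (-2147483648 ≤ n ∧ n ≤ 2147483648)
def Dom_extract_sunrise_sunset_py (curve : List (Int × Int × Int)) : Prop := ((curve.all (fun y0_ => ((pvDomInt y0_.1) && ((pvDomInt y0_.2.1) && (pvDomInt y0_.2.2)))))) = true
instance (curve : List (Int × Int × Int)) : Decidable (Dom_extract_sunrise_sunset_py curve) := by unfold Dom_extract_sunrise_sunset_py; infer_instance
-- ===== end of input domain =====

-- B replaces A's single combined loop by two independent early-exit scans (forward for
-- sunrise, backward for sunset); alternative decomposition, same exact result.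


-- ===== PORT A =====
-- A's loop over i in range(len(curve)-1) reading curve[i], curve[i+1] becomes a foldl
-- over the adjacent pairs (curve.zip curve.tail) carrying the same (sunrise, sunset) state.
def pvStepA (st : Option Int × Option Int)
    (pq : (Int × Int × Int) × (Int × Int × Int)) : Option Int × Option Int :=
  let t0 := pq.1.1
  let b0 := pq.1.2.1
  let b1 := pq.2.2.1
  (if b0 < 200 ∧ 200 ≤ b1 ∧ st.1 = none then some t0 else st.1,
   if b0 ≥ 200 ∧ 200 > b1 then some t0 else st.2)

def extract_sunrise_sunset_py (curve : List (Int × Int × Int)) : Option Int × Option Int :=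
  (curve.zip curve.tail).foldl pvStepA (none, none)

-- ===== PORT B =====
-- forward early-exit scan: first pair with b0 < 200 <= b1
def pvSunriseScan : List ((Int × Int × Int) × (Int × Int × Int)) → Option Int
  | [] => none
  | (p0, p1) :: rest =>
    if p0.2.1 < 200 ∧ 200 ≤ p1.2.1 then some p0.1 else pvSunriseScan rest

-- backward early-exit scan (over the reversed pair list): last pair with b0 >= 200 > b1
def pvSunsetScan : List ((Int × Int × Int) × (Int × Int × Int)) → Option Int
  | [] => none
  | (p0, p1) :: rest =>
    if p0.2.1 ≥ 200 ∧ 200 > p1.2.1 then some p0.1 else pvSunsetScan rest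

def extract_sunrise_sunset_py_alt (curve : List (Int × Int × Int)) : Option Int × Option Int :=
  let pairs := curve.zip curve.tail
  (pvSunriseScan pairs, pvSunsetScan pairs.reverse)

-- ===== PRECONDITION & SPEC =====
def Spec_extract_sunrise_sunset_py (curve : List (Int × Int × Int)) (out : Option Int × Option Int) : Prop := out = extract_sunrise_sunset_py_alt curve
instance (curve : List (Int × Int × Int)) (out : Option Int × Option Int) : Decidable (Spec_extract_sunrise_sunset_py curve out) := by unfold Spec_extract_sunrise_sunset_py; infer_instance

-- ===== CLAIM (what is proved, stated in full; the proofs are below) =====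
def Claim_equal_extract_sunrise_sunset_py : Prop := ∀ (curve : List (Int × Int × Int)), Dom_extract_sunrise_sunset_py curve → Spec_extract_sunrise_sunset_py curve (extract_sunrise_sunset_py curve)

-- ===== LEMMAS AND PROOFS =====
theorem pvSunsetScan_append (l₁ l₂ : List ((Int × Int × Int) × (Int × Int × Int))) :
    pvSunsetScan (l₁ ++ l₂) =
      match pvSunsetScan l₁ with
      | some v => some v
      | none => pvSunsetScan l₂ := by
  induction l₁ with
  | nil => simp [pvSunsetScan]
  | cons hd tl ih =>
    obtain ⟨p0, p1⟩ := hd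
    simp only [List.cons_append, pvSunsetScan]
    split_ifs <;> simp [ih]

theorem pv_fold_split (l : List ((Int × Int × Int) × (Int × Int × Int)))
    (acc : Option Int × Option Int) :
    l.foldl pvStepA acc =
      ((match acc.1 with
        | some v => some v
        | none => pvSunriseScan l),
       (match pvSunsetScan l.reverse with
        | some v => some v
        | none => acc.2)) := by
  induction l generalizing acc with
  | nil => cases acc with | mk a b => cases a <;> simp [pvSunriseScan, pvSunsetScan]
  | cons hd tl ih =>
    obtain ⟨p0, p1⟩ := hd
    cases acc with
    | mk a b =>
      rw [List.foldl_cons, ih]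
      simp only [List.reverse_cons, pvSunsetScan_append, pvStepA, pvSunriseScan, pvSunsetScan]
      cases a <;> split_ifs <;> simp_all <;> cases pvSunsetScan tl.reverse <;> simp

-- ===== VERDICT (by name: the statement is the Claim_ definition above) =====
theorem extract_sunrise_sunset_py_spec : Claim_equal_extract_sunrise_sunset_py := by
  intro curve _
  unfold Spec_extract_sunrise_sunset_py extract_sunrise_sunset_py extract_sunrise_sunset_py_alt
  rw [pv_fold_split]
  cases h : pvSunsetScan ((curve.zip curve.tail).reverse) <;> simp [h]
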